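-- pv_equiv track=rewrite | github.com/zdkano/parity-zero | reviewer/planner.py | _paths_for_memory_categories
-- ===== SOURCE A (Python) =====
-- def infer_path_categories(changed_paths: list[str]) -> set[str]:
--     """Infer likely finding categories from changed file paths.
--
--     This is a lightweight heuristic — it maps path segments to
--     the finding taxonomy categories to enable memory relevance matching.
--     """
--     categories: set[str] = set()
--     for path in changed_paths:
--         path_lower = path.lower()
--         segments = path_lower.split("/")
--
--         # Auth-related paths
--         if any(seg in ("auth", "login", "oauth", "session", "token",
--                         "permissions", "rbac", "acl") for seg in segments):
--             categories.add("authentication")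
--             categories.add("authorization")
--
--         # Config/settings paths
--         if any(seg in ("config", "settings", "deploy") for seg in segments):
--             categories.add("insecure_configuration")
--             categories.add("secrets")
--
--         # Security paths
--         if any(seg in ("security", "middleware") for seg in segments):
--             categories.add("authentication")
--             categories.add("authorization")
--
--         # Admin paths
--         if "admin" in segments:
--             categories.add("authorization")
--
--         # Dependency files
--         basename = path.split("/")[-1].lower() if "/" in path else path_lower
--         if basename in ("requirements.txt", "package.json", "go.mod",
--                         "cargo.toml", "gemfile", "pom.xml", "build.gradle",
--                         "composer.json"):
--             categories.add("dependency_risk")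
--
--     return categories
--
-- def _paths_for_memory_categories(
--     memory_categories: list[str],
--     changed_paths: list[str],
-- ) -> list[str]:
--     """Return changed paths that relate to the given memory categories."""
--     path_cats = infer_path_categories(changed_paths)
--     if not path_cats:
--         return []
--     relevant_cats = set(memory_categories) & path_cats
--     if not relevant_cats:
--         return changed_paths[:3]
--     # Return paths whose inferred categories overlap with memory categories
--     result: list[str] = []
--     for p in changed_paths:
--         p_cats = infer_path_categories([p])
--         if p_cats & relevant_cats:
--             result.append(p)
--     return result
-- ===== SOURCE B (Python) =====
-- # Data-driven inverted index: one pass over the paths builds category -> positions,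
-- # selection is then pure index lookups; no re-classification, no per-path set intersections.
--
-- _SEG_CATS = {
--     "auth": ("authentication", "authorization"),
--     "login": ("authentication", "authorization"),
--     "oauth": ("authentication", "authorization"),
--     "session": ("authentication", "authorization"),
--     "token": ("authentication", "authorization"),
--     "permissions": ("authentication", "authorization"),
--     "rbac": ("authentication", "authorization"),
--     "acl": ("authentication", "authorization"),
--     "security": ("authentication", "authorization"),
--     "middleware": ("authentication", "authorization"),
--     "config": ("insecure_configuration", "secrets"),
--     "settings": ("insecure_configuration", "secrets"),
--     "deploy": ("insecure_configuration", "secrets"),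
--     "admin": ("authorization",),
-- }
--
-- _BASE_CATS = {
--     "requirements.txt": ("dependency_risk",),
--     "package.json": ("dependency_risk",),
--     "go.mod": ("dependency_risk",),
--     "cargo.toml": ("dependency_risk",),
--     "gemfile": ("dependency_risk",),
--     "pom.xml": ("dependency_risk",),
--     "build.gradle": ("dependency_risk",),
--     "composer.json": ("dependency_risk",),
-- }
--
--
-- def _paths_for_memory_categories(memory_categories, changed_paths):
--     # inverted index: category -> set of positions of paths carrying it
--     index = {}
--     for i, p in enumerate(changed_paths):
--         low = p.lower()
--         for seg in low.split("/"):
--             for c in _SEG_CATS.get(seg, ()):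
--                 index.setdefault(c, set()).add(i)
--         base = p.split("/")[-1].lower() if "/" in p else low
--         for c in _BASE_CATS.get(base, ()):
--             index.setdefault(c, set()).add(i)
--     if not index:
--         return []
--     hits = set()
--     for c in memory_categories:
--         hits |= index.get(c, set())
--     if not hits:
--         return changed_paths[:3]
--     return [p for i, p in enumerate(changed_paths) if i in hits]
-- ===== Notes on version B (the rewrite author's own statement) =====
-- stated objective: faster
-- what changed: B replaces A's branch-chain classifier run twice per path with a data-driven keyword->categories table and a single pass that builds an inverted index category->positions; emptiness, relevance and the final selection are then answered by index lookups (position membership) instead of re-running the inference on a singleton list per path and intersecting per-path category sets.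
import Mathlib
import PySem

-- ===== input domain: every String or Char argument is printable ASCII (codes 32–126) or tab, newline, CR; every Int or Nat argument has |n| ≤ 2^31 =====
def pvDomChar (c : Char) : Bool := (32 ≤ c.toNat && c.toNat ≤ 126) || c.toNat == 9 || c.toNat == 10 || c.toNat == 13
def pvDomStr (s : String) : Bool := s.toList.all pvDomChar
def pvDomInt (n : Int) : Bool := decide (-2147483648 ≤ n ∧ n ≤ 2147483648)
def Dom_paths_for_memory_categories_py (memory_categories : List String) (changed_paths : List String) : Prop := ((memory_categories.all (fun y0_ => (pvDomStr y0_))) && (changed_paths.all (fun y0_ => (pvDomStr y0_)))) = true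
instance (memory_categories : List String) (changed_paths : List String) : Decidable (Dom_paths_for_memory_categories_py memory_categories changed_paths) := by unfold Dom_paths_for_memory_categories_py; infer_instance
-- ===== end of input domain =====

-- B replaces A's twice-run branch-chain classifier by a keyword->categories table and one
-- indexing pass building an inverted index category -> path positions; selection is index lookups.


-- ===== PORT A =====
-- the tuples of segment/file names A tests membership in
def pvTupleAuth : List String := ["auth", "login", "oauth", "session", "token", "permissions", "rbac", "acl"]
def pvTupleCfg : List String := ["config", "settings", "deploy"]
def pvTupleSec : List String := ["security", "middleware"]
def pvTupleDep : List String := ["requirements.txt", "package.json", "go.mod", "cargo.toml", "gemfile", "pom.xml", "build.gradle", "composer.json"]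

-- one iteration of infer_path_categories' loop body
def inferStep (categories : PySem.Set String) (path : String) : PySem.Set String :=
  let path_lower := PySem.Str.lower path
  -- path_lower.split("/"): sep "/" ≠ "" so split? is always some; .getD [] is exact
  let segments := (PySem.Str.split? path_lower "/").getD []
  let categories := if segments.any (fun seg => pvTupleAuth.contains seg) then
    PySem.Set.add (PySem.Set.add categories "authentication") "authorization" else categories
  let categories := if segments.any (fun seg => pvTupleCfg.contains seg) then
    PySem.Set.add (PySem.Set.add categories "insecure_configuration") "secrets" else categories
  let categories := if segments.any (fun seg => pvTupleSec.contains seg) then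
    PySem.Set.add (PySem.Set.add categories "authentication") "authorization" else categories
  let categories := if segments.contains "admin" then PySem.Set.add categories "authorization" else categories
  -- path.split("/")[-1]: split always returns a nonempty list, so pyGet? -1 is some; .getD "" is exact
  let basename := if PySem.Str.isIn "/" path then
    PySem.Str.lower ((PySem.List.pyGet? ((PySem.Str.split? path "/").getD []) (-1)).getD "")
    else path_lower
  let categories := if pvTupleDep.contains basename then PySem.Set.add categories "dependency_risk" else categories
  categories

def infer_path_categories_py (changed_paths : List String) : PySem.Set String :=
  changed_paths.foldl inferStep PySem.Set.empty

def paths_for_memory_categories_py (memory_categories : List String) (changed_paths : List String) : List String :=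
  let path_cats := infer_path_categories_py changed_paths
  if path_cats.isEmpty then []
  else
    let relevant_cats := PySem.Set.inter (PySem.Set.ofList memory_categories) path_cats
    if relevant_cats.isEmpty then PySem.List.slice changed_paths none (some 3)
    else changed_paths.foldl (fun result p =>
      let p_cats := infer_path_categories_py [p]
      if !(PySem.Set.inter p_cats relevant_cats).isEmpty then result ++ [p] else result) []

-- ===== PORT B =====
-- the keyword -> categories tables (tuples ported as lists)
def pvSegCats : PySem.Dict String (List String) := PySem.Dict.ofList
  [("auth", ["authentication", "authorization"]),
   ("login", ["authentication", "authorization"]),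
   ("oauth", ["authentication", "authorization"]),
   ("session", ["authentication", "authorization"]),
   ("token", ["authentication", "authorization"]),
   ("permissions", ["authentication", "authorization"]),
   ("rbac", ["authentication", "authorization"]),
   ("acl", ["authentication", "authorization"]),
   ("security", ["authentication", "authorization"]),
   ("middleware", ["authentication", "authorization"]),
   ("config", ["insecure_configuration", "secrets"]),
   ("settings", ["insecure_configuration", "secrets"]),
   ("deploy", ["insecure_configuration", "secrets"]),
   ("admin", ["authorization"])]

def pvBaseCats : PySem.Dict String (List String) := PySem.Dict.ofList
  [("requirements.txt", ["dependency_risk"]),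
   ("package.json", ["dependency_risk"]),
   ("go.mod", ["dependency_risk"]),
   ("cargo.toml", ["dependency_risk"]),
   ("gemfile", ["dependency_risk"]),
   ("pom.xml", ["dependency_risk"]),
   ("build.gradle", ["dependency_risk"]),
   ("composer.json", ["dependency_risk"])]

-- 'for c in cats: index.setdefault(c, set()).add(i)' — setdefault+in-place add = overwrite-in-place insert
def pvIndexAdd (ix : PySem.Dict String (PySem.Set Int)) (cats : List String) (i : Int) : PySem.Dict String (PySem.Set Int) :=
  cats.foldl (fun ix c => ix.insert c (PySem.Set.add (ix.getD c PySem.Set.empty) i)) ix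

-- the body of B's single indexing pass, for one (i, p) of enumerate(changed_paths)
def pvIndexStep (ix : PySem.Dict String (PySem.Set Int)) (ip : Int × String) : PySem.Dict String (PySem.Set Int) :=
  let low := PySem.Str.lower ip.2
  -- low.split("/"): sep "/" ≠ "" so split? is always some; .getD [] is exact
  let ix := ((PySem.Str.split? low "/").getD []).foldl
      (fun ix seg => pvIndexAdd ix (pvSegCats.getD seg []) ip.1) ix
  -- p.split("/")[-1]: split always returns a nonempty list, so pyGet? -1 is some; .getD "" is exact
  let base := if PySem.Str.isIn "/" ip.2 then
      PySem.Str.lower ((PySem.List.pyGet? ((PySem.Str.split? ip.2 "/").getD []) (-1)).getD "")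
    else low
  pvIndexAdd ix (pvBaseCats.getD base []) ip.1

def paths_for_memory_categories_py_alt (memory_categories : List String) (changed_paths : List String) : List String :=
  let index := (PySem.List.enumerate changed_paths).foldl pvIndexStep PySem.Dict.empty
  if index.size == 0 then []
  else
    let hits := memory_categories.foldl
      (fun h c => PySem.Set.union h (index.getD c PySem.Set.empty)) PySem.Set.empty
    if hits.isEmpty then PySem.List.slice changed_paths none (some 3)
    else ((PySem.List.enumerate changed_paths).filter
      (fun ip => PySem.Set.contains hits ip.1)).map (fun ip => ip.2)

-- ===== PRECONDITION & SPEC =====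
def Spec_paths_for_memory_categories_py (memory_categories : List String) (changed_paths : List String) (out : List String) : Prop := out = paths_for_memory_categories_py_alt memory_categories changed_paths
instance (memory_categories : List String) (changed_paths : List String) (out : List String) : Decidable (Spec_paths_for_memory_categories_py memory_categories changed_paths out) := by unfold Spec_paths_for_memory_categories_py; infer_instance

-- ===== CLAIM (what is proved, stated in full; the proofs are below) =====
def Claim_equal_paths_for_memory_categories_py : Prop := ∀ (memory_categories : List String) (changed_paths : List String), Dom_paths_for_memory_categories_py memory_categories changed_paths → Spec_paths_for_memory_categories_py memory_categories changed_paths (paths_for_memory_categories_py memory_categories changed_paths)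

-- ===== LEMMAS AND PROOFS =====

-- proof-only abbreviations for the per-path data both programs derive
def pvSegsOf (p : String) : List String := (PySem.Str.split? (PySem.Str.lower p) "/").getD []
def pvBaseOf (p : String) : String :=
  if PySem.Str.isIn "/" p then
    PySem.Str.lower ((PySem.List.pyGet? ((PySem.Str.split? p "/").getD []) (-1)).getD "")
  else PySem.Str.lower p
-- the category relation both programs implement
def pvCat (p c : String) : Prop :=
  (∃ seg ∈ pvSegsOf p, c ∈ pvSegCats.getD seg []) ∨ c ∈ pvBaseCats.getD (pvBaseOf p) []

-- a nonempty intersection of sets is exactly a common member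
theorem pv_inter_ne (s t : PySem.Set String) :
    ((PySem.Set.inter s t).isEmpty = false) ↔ ∃ x, x ∈ s ∧ x ∈ t := by
  rw [Bool.eq_false_iff, Ne, List.isEmpty_iff, List.eq_nil_iff_forall_not_mem]
  simp only [not_forall, not_not]
  constructor
  · rintro ⟨x, hx⟩; exact ⟨x, (PySem.Set.mem_inter s t x).1 hx⟩
  · rintro ⟨x, hx⟩; exact ⟨x, (PySem.Set.mem_inter s t x).2 hx⟩

-- what the keyword table maps an arbitrary segment to
theorem pv_mem_segCats (seg c : String) :
    c ∈ pvSegCats.getD seg [] ↔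
      ((seg ∈ pvTupleAuth ∨ seg ∈ pvTupleSec) ∧ (c = "authentication" ∨ c = "authorization")) ∨
      (seg ∈ pvTupleCfg ∧ (c = "insecure_configuration" ∨ c = "secrets")) ∨
      (seg = "admin" ∧ c = "authorization") := by
  constructor
  · intro hc
    rw [PySem.Dict.getD_eq_get?_getD] at hc
    cases heq : pvSegCats.get? seg with
    | none => rw [heq] at hc; simp at hc
    | some v =>
      rw [heq] at hc
      have hm := PySem.Dict.mem_items_of_get?_eq_some (d := pvSegCats) heq
      have hitems : pvSegCats.items =
        [("auth", ["authentication", "authorization"]), ("login", ["authentication", "authorization"]),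
         ("oauth", ["authentication", "authorization"]), ("session", ["authentication", "authorization"]),
         ("token", ["authentication", "authorization"]), ("permissions", ["authentication", "authorization"]),
         ("rbac", ["authentication", "authorization"]), ("acl", ["authentication", "authorization"]),
         ("security", ["authentication", "authorization"]), ("middleware", ["authentication", "authorization"]),
         ("config", ["insecure_configuration", "secrets"]), ("settings", ["insecure_configuration", "secrets"]),
         ("deploy", ["insecure_configuration", "secrets"]), ("admin", ["authorization"])] := rfl
      rw [hitems] at hm
      clear heq hitems
      simp only [List.mem_cons, List.not_mem_nil, or_false, Prod.mk.injEq] at hm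
      rcases hm with ⟨rfl, rfl⟩ | ⟨rfl, rfl⟩ | ⟨rfl, rfl⟩ | ⟨rfl, rfl⟩ | ⟨rfl, rfl⟩ | ⟨rfl, rfl⟩ |
        ⟨rfl, rfl⟩ | ⟨rfl, rfl⟩ | ⟨rfl, rfl⟩ | ⟨rfl, rfl⟩ | ⟨rfl, rfl⟩ | ⟨rfl, rfl⟩ | ⟨rfl, rfl⟩ | ⟨rfl, rfl⟩ <;>
        (simp at hc ; simp [pvTupleAuth, pvTupleSec, pvTupleCfg] ; tauto)
  · intro h
    simp only [pvTupleAuth, pvTupleSec, pvTupleCfg, List.mem_cons, List.not_mem_nil, or_false] at h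
    rcases h with ⟨h1 | h1, h2⟩ | ⟨h1, h2⟩ | ⟨rfl, h2⟩
    · rcases h1 with rfl|rfl|rfl|rfl|rfl|rfl|rfl|rfl <;> rcases h2 with rfl|rfl <;> decide
    · rcases h1 with rfl|rfl <;> rcases h2 with rfl|rfl <;> decide
    · rcases h1 with rfl|rfl|rfl <;> rcases h2 with rfl|rfl <;> decide
    · subst h2; decide

theorem pv_mem_baseCats (b c : String) :
    c ∈ pvBaseCats.getD b [] ↔ b ∈ pvTupleDep ∧ c = "dependency_risk" := by
  constructor
  · intro hc
    rw [PySem.Dict.getD_eq_get?_getD] at hc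
    cases heq : pvBaseCats.get? b with
    | none => rw [heq] at hc; simp at hc
    | some v =>
      rw [heq] at hc
      have hm := PySem.Dict.mem_items_of_get?_eq_some (d := pvBaseCats) heq
      have hitems : pvBaseCats.items =
        [("requirements.txt", ["dependency_risk"]), ("package.json", ["dependency_risk"]),
         ("go.mod", ["dependency_risk"]), ("cargo.toml", ["dependency_risk"]),
         ("gemfile", ["dependency_risk"]), ("pom.xml", ["dependency_risk"]),
         ("build.gradle", ["dependency_risk"]), ("composer.json", ["dependency_risk"])] := rfl
      rw [hitems] at hm
      clear heq hitems
      simp only [List.mem_cons, List.not_mem_nil, or_false, Prod.mk.injEq] at hm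
      rcases hm with ⟨rfl, rfl⟩ | ⟨rfl, rfl⟩ | ⟨rfl, rfl⟩ | ⟨rfl, rfl⟩ | ⟨rfl, rfl⟩ | ⟨rfl, rfl⟩ |
        ⟨rfl, rfl⟩ | ⟨rfl, rfl⟩ <;>
        (simp at hc ; simp [pvTupleDep] ; tauto)
  · intro h
    simp only [pvTupleDep, List.mem_cons, List.not_mem_nil, or_false] at h
    rcases h with ⟨h1, rfl⟩
    rcases h1 with rfl|rfl|rfl|rfl|rfl|rfl|rfl|rfl <;> decide

-- pvCat written as A's five branch conditions
theorem pv_cat_iff (p c : String) :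
    pvCat p c ↔
      (((pvSegsOf p).any (fun seg => pvTupleAuth.contains seg) = true ∨
        (pvSegsOf p).any (fun seg => pvTupleSec.contains seg) = true) ∧
        (c = "authentication" ∨ c = "authorization")) ∨
      ((pvSegsOf p).any (fun seg => pvTupleCfg.contains seg) = true ∧
        (c = "insecure_configuration" ∨ c = "secrets")) ∨
      ((pvSegsOf p).contains "admin" = true ∧ c = "authorization") ∨
      (pvTupleDep.contains (pvBaseOf p) = true ∧ c = "dependency_risk") := by
  unfold pvCat
  simp only [pv_mem_segCats, pv_mem_baseCats, List.any_eq_true, List.contains_iff_mem]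
  constructor
  · rintro (⟨seg, hs, (⟨h1, h2⟩ | ⟨h1, h2⟩ | ⟨rfl, h2⟩)⟩ | ⟨h1, h2⟩)
    · rcases h1 with h1 | h1
      · exact Or.inl ⟨Or.inl ⟨seg, hs, h1⟩, h2⟩
      · exact Or.inl ⟨Or.inr ⟨seg, hs, h1⟩, h2⟩
    · exact Or.inr (Or.inl ⟨⟨seg, hs, h1⟩, h2⟩)
    · exact Or.inr (Or.inr (Or.inl ⟨hs, h2⟩))
    · exact Or.inr (Or.inr (Or.inr ⟨h1, h2⟩))
  · rintro (⟨(⟨seg, hs, h1⟩ | ⟨seg, hs, h1⟩), h2⟩ | ⟨⟨seg, hs, h1⟩, h2⟩ | ⟨hs, h2⟩ | ⟨h1, h2⟩)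
    · exact Or.inl ⟨seg, hs, Or.inl ⟨Or.inl h1, h2⟩⟩
    · exact Or.inl ⟨seg, hs, Or.inl ⟨Or.inr h1, h2⟩⟩
    · exact Or.inl ⟨seg, hs, Or.inr (Or.inl ⟨h1, h2⟩)⟩
    · exact Or.inl ⟨"admin", hs, Or.inr (Or.inr ⟨rfl, h2⟩)⟩
    · exact Or.inr ⟨h1, h2⟩

-- the abstract shape of A's if-chain
theorem pv_step_core (acc : PySem.Set String) (a1 a2 a3 a4 a5 : Bool) (c : String) :
    (c ∈ (let s1 := if a1 then PySem.Set.add (PySem.Set.add acc "authentication") "authorization" else acc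
      let s2 := if a2 then PySem.Set.add (PySem.Set.add s1 "insecure_configuration") "secrets" else s1
      let s3 := if a3 then PySem.Set.add (PySem.Set.add s2 "authentication") "authorization" else s2
      let s4 := if a4 then PySem.Set.add s3 "authorization" else s3
      if a5 then PySem.Set.add s4 "dependency_risk" else s4)) ↔
    c ∈ acc ∨ (((a1 = true ∨ a3 = true) ∧ (c = "authentication" ∨ c = "authorization")) ∨
      (a2 = true ∧ (c = "insecure_configuration" ∨ c = "secrets")) ∨
      (a4 = true ∧ c = "authorization") ∨
      (a5 = true ∧ c = "dependency_risk")) := by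
  cases a1 <;> cases a2 <;> cases a3 <;> cases a4 <;> cases a5 <;>
    simp [PySem.Set.mem_add] <;> tauto

-- the if-chain of A's step adds exactly pvCat
theorem pv_mem_inferStep (acc : PySem.Set String) (p c : String) :
    c ∈ inferStep acc p ↔ c ∈ acc ∨ pvCat p c := by
  rw [pv_cat_iff]
  exact pv_step_core acc ((pvSegsOf p).any (fun seg => pvTupleAuth.contains seg))
    ((pvSegsOf p).any (fun seg => pvTupleCfg.contains seg))
    ((pvSegsOf p).any (fun seg => pvTupleSec.contains seg))
    ((pvSegsOf p).contains "admin") (pvTupleDep.contains (pvBaseOf p)) c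

-- membership in A's accumulated inference
theorem pv_mem_infer (cp : List String) (acc : PySem.Set String) (c : String) :
    c ∈ cp.foldl inferStep acc ↔ c ∈ acc ∨ ∃ p ∈ cp, pvCat p c := by
  induction cp generalizing acc with
  | nil => simp
  | cons q qs ih =>
    simp only [List.foldl_cons, ih, pv_mem_inferStep, List.mem_cons]
    constructor
    · rintro ((h | h) | ⟨p, hp, hc⟩)
      · exact Or.inl h
      · exact Or.inr ⟨q, Or.inl rfl, h⟩
      · exact Or.inr ⟨p, Or.inr hp, hc⟩
    · rintro (h | ⟨p, (rfl | hp), hc⟩)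
      · exact Or.inl (Or.inl h)
      · exact Or.inl (Or.inr hc)
      · exact Or.inr ⟨p, hp, hc⟩

-- B's inner setdefault/add loop: positions recorded at key c
theorem pv_getD_indexAdd (ix : PySem.Dict String (PySem.Set Int)) (cats : List String) (i j : Int) (c : String) :
    j ∈ (pvIndexAdd ix cats i).getD c PySem.Set.empty ↔
      j ∈ ix.getD c PySem.Set.empty ∨ (c ∈ cats ∧ j = i) := by
  induction cats generalizing ix with
  | nil => simp [pvIndexAdd]
  | cons c' tl ih =>
    show j ∈ (pvIndexAdd (ix.insert c' (PySem.Set.add (ix.getD c' PySem.Set.empty) i)) tl i).getD c PySem.Set.empty ↔ _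
    rw [ih, PySem.Dict.getD_insert]
    by_cases h : c = c' <;> simp [h, PySem.Set.mem_add] <;> tauto

theorem pv_keys_indexAdd (ix : PySem.Dict String (PySem.Set Int)) (cats : List String) (i : Int) (c : String) :
    c ∈ (pvIndexAdd ix cats i).keys ↔ c ∈ ix.keys ∨ c ∈ cats := by
  unfold pvIndexAdd
  rw [PySem.Dict.keys_foldl_insert]
  exact PySem.Set.mem_update _ _ _

-- the segment loop of B's indexing step
theorem pv_getD_segfold (segs : List String) (i j : Int) (c : String)
    (ix0 : PySem.Dict String (PySem.Set Int)) :
    j ∈ (segs.foldl (fun ix seg => pvIndexAdd ix (pvSegCats.getD seg []) i) ix0).getD c PySem.Set.empty ↔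
      j ∈ ix0.getD c PySem.Set.empty ∨ ((∃ seg ∈ segs, c ∈ pvSegCats.getD seg []) ∧ j = i) := by
  induction segs generalizing ix0 with
  | nil => simp
  | cons s tl ih =>
    simp only [List.foldl_cons, ih, pv_getD_indexAdd, List.mem_cons]
    constructor
    · rintro ((h | ⟨h1, h2⟩) | ⟨⟨seg, hs, h1⟩, h2⟩)
      · exact Or.inl h
      · exact Or.inr ⟨⟨s, Or.inl rfl, h1⟩, h2⟩
      · exact Or.inr ⟨⟨seg, Or.inr hs, h1⟩, h2⟩
    · rintro (h | ⟨⟨seg, (rfl | hs), h1⟩, h2⟩)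
      · exact Or.inl (Or.inl h)
      · exact Or.inl (Or.inr ⟨h1, h2⟩)
      · exact Or.inr ⟨⟨seg, hs, h1⟩, h2⟩

theorem pv_keys_segfold (segs : List String) (i : Int) (c : String)
    (ix0 : PySem.Dict String (PySem.Set Int)) :
    c ∈ (segs.foldl (fun ix seg => pvIndexAdd ix (pvSegCats.getD seg []) i) ix0).keys ↔
      c ∈ ix0.keys ∨ ∃ seg ∈ segs, c ∈ pvSegCats.getD seg [] := by
  induction segs generalizing ix0 with
  | nil => simp
  | cons s tl ih =>
    simp only [List.foldl_cons, ih, pv_keys_indexAdd, List.mem_cons]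
    constructor
    · rintro ((h | h) | ⟨seg, hs, h1⟩)
      · exact Or.inl h
      · exact Or.inr ⟨s, Or.inl rfl, h⟩
      · exact Or.inr ⟨seg, Or.inr hs, h1⟩
    · rintro (h | ⟨seg, (rfl | hs), h1⟩)
      · exact Or.inl (Or.inl h)
      · exact Or.inl (Or.inr h1)
      · exact Or.inr ⟨seg, hs, h1⟩

-- one step of B's indexing pass
set_option maxHeartbeats 1000000 in
theorem pv_getD_step (ix : PySem.Dict String (PySem.Set Int)) (ip : Int × String) (j : Int) (c : String) :
    j ∈ (pvIndexStep ix ip).getD c PySem.Set.empty ↔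
      j ∈ ix.getD c PySem.Set.empty ∨ (pvCat ip.2 c ∧ j = ip.1) := by
  show j ∈ (pvIndexAdd ((pvSegsOf ip.2).foldl
      (fun ix seg => pvIndexAdd ix (pvSegCats.getD seg []) ip.1) ix)
      (pvBaseCats.getD (pvBaseOf ip.2) []) ip.1).getD c PySem.Set.empty ↔ _
  rw [pv_getD_indexAdd, pv_getD_segfold]
  unfold pvCat
  constructor
  · rintro ((h | ⟨h1, h2⟩) | ⟨h1, h2⟩)
    · exact Or.inl h
    · exact Or.inr ⟨Or.inl h1, h2⟩
    · exact Or.inr ⟨Or.inr h1, h2⟩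
  · rintro (h | ⟨h1 | h1, h2⟩)
    · exact Or.inl (Or.inl h)
    · exact Or.inl (Or.inr ⟨h1, h2⟩)
    · exact Or.inr ⟨h1, h2⟩

set_option maxHeartbeats 1000000 in
theorem pv_keys_step (ix : PySem.Dict String (PySem.Set Int)) (ip : Int × String) (c : String) :
    c ∈ (pvIndexStep ix ip).keys ↔ c ∈ ix.keys ∨ pvCat ip.2 c := by
  show c ∈ (pvIndexAdd ((pvSegsOf ip.2).foldl
      (fun ix seg => pvIndexAdd ix (pvSegCats.getD seg []) ip.1) ix)
      (pvBaseCats.getD (pvBaseOf ip.2) []) ip.1).keys ↔ _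
  rw [pv_keys_indexAdd, pv_keys_segfold]
  unfold pvCat
  rw [or_assoc]

-- the whole indexing pass: positions at key c
theorem pv_getD_index (cp : List String) (s : Int) (acc : PySem.Dict String (PySem.Set Int)) (j : Int) (c : String) :
    j ∈ ((PySem.List.enumerate cp s).foldl pvIndexStep acc).getD c PySem.Set.empty ↔
      j ∈ acc.getD c PySem.Set.empty ∨ ∃ (k : Nat) (_ : k < cp.length), pvCat cp[k] c ∧ j = s + k := by
  induction cp generalizing s acc with
  | nil => simp [PySem.List.enumerate_nil]
  | cons q qs ih =>
    rw [PySem.List.enumerate_cons, List.foldl_cons, ih, pv_getD_step]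
    constructor
    · rintro ((h | ⟨h1, h2⟩) | ⟨k, hk, h1, h2⟩)
      · exact Or.inl h
      · exact Or.inr ⟨0, by simp, h1, by simpa using h2⟩
      · exact Or.inr ⟨k + 1, by simpa using hk, by simpa using h1, by omega⟩
    · rintro (h | ⟨k, hk, h1, h2⟩)
      · exact Or.inl (Or.inl h)
      · cases k with
        | zero => exact Or.inl (Or.inr ⟨by simpa using h1, by simpa using h2⟩)
        | succ k => exact Or.inr ⟨k, by simpa using hk, by simpa using h1, by omega⟩

theorem pv_keys_index (cp : List String) (s : Int) (acc : PySem.Dict String (PySem.Set Int)) (c : String) :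
    c ∈ ((PySem.List.enumerate cp s).foldl pvIndexStep acc).keys ↔
      c ∈ acc.keys ∨ ∃ p ∈ cp, pvCat p c := by
  induction cp generalizing s acc with
  | nil => simp [PySem.List.enumerate_nil]
  | cons q qs ih =>
    rw [PySem.List.enumerate_cons, List.foldl_cons, ih, pv_keys_step]
    simp only [List.mem_cons]
    constructor
    · rintro ((h | h) | ⟨p, hp, hc⟩)
      · exact Or.inl h
      · exact Or.inr ⟨q, Or.inl rfl, h⟩
      · exact Or.inr ⟨p, Or.inr hp, hc⟩
    · rintro (h | ⟨p, (rfl | hp), hc⟩)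
      · exact Or.inl (Or.inl h)
      · exact Or.inl (Or.inr hc)
      · exact Or.inr ⟨p, hp, hc⟩

-- B's hits loop is a union over memory_categories
theorem pv_mem_hits (mc : List String) (f : String → PySem.Set Int) (h0 : PySem.Set Int) (j : Int) :
    j ∈ mc.foldl (fun h c => PySem.Set.union h (f c)) h0 ↔ j ∈ h0 ∨ ∃ c ∈ mc, j ∈ f c := by
  induction mc generalizing h0 with
  | nil => simp
  | cons m ms ih =>
    simp only [List.foldl_cons, ih, PySem.Set.mem_union, List.mem_cons]
    constructor
    · rintro ((h | h) | ⟨c, hc, hj⟩)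
      · exact Or.inl h
      · exact Or.inr ⟨m, Or.inl rfl, h⟩
      · exact Or.inr ⟨c, Or.inr hc, hj⟩
    · rintro (h | ⟨c, (rfl | hc), hj⟩)
      · exact Or.inl (Or.inl h)
      · exact Or.inl (Or.inr hj)
      · exact Or.inr ⟨c, hc, hj⟩

-- filtering enumerate by a position predicate that agrees with an element predicate
theorem pv_enum_filter (cp : List String) (s : Int) (q : Int × String → Bool) (r : String → Bool)
    (h : ∀ (k : Nat) (hk : k < cp.length), q (s + k, cp[k]) = r cp[k]) :
    ((PySem.List.enumerate cp s).filter q).map (fun ip => ip.2) = cp.filter r := by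
  induction cp generalizing s with
  | nil => simp [PySem.List.enumerate_nil]
  | cons x xs ih =>
    rw [PySem.List.enumerate_cons, List.filter_cons, List.filter_cons]
    have h0 : q (s, x) = r x := by simpa using h 0 (by simp)
    have htl : ((PySem.List.enumerate xs (s + 1)).filter q).map (fun ip => ip.2) = xs.filter r := by
      apply ih
      intro k hk
      have := h (k + 1) (by simpa using hk)
      simpa [add_assoc, add_comm, add_left_comm] using this
    rw [h0]
    cases r x <;> simp [htl]

-- ===== VERDICT (by name: the statement is the Claim_ definition above) =====
theorem paths_for_memory_categories_py_spec : Claim_equal_paths_for_memory_categories_py := by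
  intro mc cp _
  unfold Spec_paths_for_memory_categories_py
  unfold paths_for_memory_categories_py paths_for_memory_categories_py_alt
  dsimp only []
  set index := (PySem.List.enumerate cp).foldl pvIndexStep PySem.Dict.empty with hindex
  -- the two emptiness guards agree
  have e1 : (index.size == 0) = (infer_path_categories_py cp).isEmpty := by
    have hsz : index.size = index.keys.length := by
      simp [PySem.Dict.size, PySem.Dict.keys, List.length_map]
    rw [Bool.eq_iff_iff, beq_iff_eq, hsz, List.length_eq_zero_iff, List.isEmpty_iff,
      List.eq_nil_iff_forall_not_mem, List.eq_nil_iff_forall_not_mem]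
    constructor
    · intro h c hc
      rcases (pv_mem_infer cp PySem.Set.empty c).1 hc with h0 | hex
      · simp [PySem.Set.empty] at h0
      · exact h c ((pv_keys_index cp 0 PySem.Dict.empty c).2 (Or.inr hex))
    · intro h c hc
      rcases (pv_keys_index cp 0 PySem.Dict.empty c).1 hc with h0 | hex
      · simp [PySem.Dict.empty, PySem.Dict.keys] at h0
      · exact h c ((pv_mem_infer cp PySem.Set.empty c).2 (Or.inr hex))
  rw [e1]
  by_cases h1 : (infer_path_categories_py cp).isEmpty = true
  · simp only [h1, if_true]
  · rw [if_neg h1, if_neg h1]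
    set relevant := PySem.Set.inter (PySem.Set.ofList mc) (infer_path_categories_py cp) with hrel
    set hits := mc.foldl (fun h c => PySem.Set.union h (index.getD c PySem.Set.empty)) PySem.Set.empty with hhits
    -- a position is hit iff its path bears a memory category
    have memHit : ∀ j : Int, j ∈ hits ↔
        ∃ c ∈ mc, ∃ (k : Nat) (_ : k < cp.length), pvCat cp[k] c ∧ j = (k : Int) := by
      intro j
      rw [hhits, pv_mem_hits]
      simp only [PySem.Set.empty, List.not_mem_nil, false_or]
      constructor
      · rintro ⟨c, hc, hj⟩
        rcases (pv_getD_index cp 0 PySem.Dict.empty j c).1 hj with h0 | ⟨k, hk, hcat, hjk⟩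
        · simp [PySem.Dict.empty, PySem.Dict.getD, PySem.Dict.get?] at h0
        · exact ⟨c, hc, k, hk, hcat, by omega⟩
      · rintro ⟨c, hc, k, hk, hcat, hjk⟩
        exact ⟨c, hc, (pv_getD_index cp 0 PySem.Dict.empty j c).2 (Or.inr ⟨k, hk, hcat, by omega⟩)⟩
    -- a category is relevant iff it is a memory category borne by some path
    have memRel : ∀ c : String, c ∈ relevant ↔ c ∈ mc ∧ ∃ p ∈ cp, pvCat p c := by
      intro c
      rw [hrel, PySem.Set.mem_inter, PySem.Set.mem_ofList]
      unfold infer_path_categories_py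
      rw [pv_mem_infer]
      simp [PySem.Set.empty]
    -- the two relevance guards agree
    have e2 : hits.isEmpty = relevant.isEmpty := by
      rw [Bool.eq_iff_iff, List.isEmpty_iff, List.isEmpty_iff,
        List.eq_nil_iff_forall_not_mem, List.eq_nil_iff_forall_not_mem]
      constructor
      · intro h c hc
        rcases (memRel c).1 hc with ⟨hmc, p, hp, hcat⟩
        rcases List.mem_iff_getElem.1 hp with ⟨k, hk, rfl⟩
        exact h (k : Int) ((memHit (k : Int)).2 ⟨c, hmc, k, hk, hcat, rfl⟩)
      · intro h j hj
        rcases (memHit j).1 hj with ⟨c, hmc, k, hk, hcat, rfl⟩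
        exact h c ((memRel c).2 ⟨hmc, cp[k], List.getElem_mem hk, hcat⟩)
    rw [e2]
    by_cases h2 : relevant.isEmpty = true
    · rw [if_pos h2, if_pos h2]
    · rw [if_neg h2, if_neg h2]
      -- A's append loop is a filter over cp
      rw [PySem.List.foldl_append_if_eq_filter
            (fun p => !(PySem.Set.inter (infer_path_categories_py [p]) relevant).isEmpty) cp []]
      rw [List.nil_append]
      symm
      apply pv_enum_filter cp 0
        (fun ip => PySem.Set.contains hits ip.1)
        (fun p => !(PySem.Set.inter (infer_path_categories_py [p]) relevant).isEmpty)
      intro k hk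
      rw [Bool.eq_iff_iff]
      simp only [PySem.Set.contains_iff, zero_add]
      rw [memHit, Bool.not_eq_true', pv_inter_ne]
      constructor
      · rintro ⟨c, hmc, k', hk', hcat, hjk⟩
        have hkk : k' = k := by exact_mod_cast hjk.symm
        subst hkk
        refine ⟨c, ?_, (memRel c).2 ⟨hmc, cp[k'], List.getElem_mem hk', hcat⟩⟩
        unfold infer_path_categories_py
        rw [pv_mem_infer]
        exact Or.inr ⟨cp[k'], by simp, hcat⟩
      · rintro ⟨c, hc1, hc2⟩
        rcases (memRel c).1 hc2 with ⟨hmc, _⟩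
        have hcat : pvCat cp[k] c := by
          unfold infer_path_categories_py at hc1
          rcases (pv_mem_infer [cp[k]] PySem.Set.empty c).1 hc1 with h0 | ⟨p, hp, hcat⟩
          · simp [PySem.Set.empty] at h0
          · obtain rfl := List.mem_singleton.1 hp
            exact hcat
        exact ⟨c, hmc, k, hk, hcat, rfl⟩
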